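-- pv_equiv track=rewrite | github.com/shobhit73/aca1095-backend | pdf_filler.py | _norm_month_key
-- ===== SOURCE A (Python) =====
-- MONTHS_3 = ["Jan","Feb","Mar","Apr","May","Jun","Jul","Aug","Sep","Oct","Nov","Dec"]
--
-- MONTHS_LONG = ["January","February","March","April","May","June","July","August","September","October","November","December"]
--
-- MONTHS_ALT = {"Jun":"June","Jul":"July","Sep":"Sept"}  # many templates use "Sept"
--
-- def _norm_month_key(k: str) -> str:
--     k = (k or "").strip()
--     if k in MONTHS_3:
--         return k
--     if k.title() in MONTHS_LONG:
--         idx = MONTHS_LONG.index(k.title())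
--         return MONTHS_3[idx]
--     if k in MONTHS_ALT:
--         return [kk for kk,v in MONTHS_ALT.items() if v == k][0]  # reverse
--     # try first 3
--     t = k[:3].title()
--     return t if t in MONTHS_3 else k
-- ===== SOURCE B (Python) =====
-- MONTHS_3 = ["Jan","Feb","Mar","Apr","May","Jun","Jul","Aug","Sep","Oct","Nov","Dec"]
--
-- _BY3 = {m.lower(): m for m in MONTHS_3}
--
-- def _norm_month_key(k: str) -> str:
--     # Single case-insensitive hash lookup on the first three characters:
--     # every branch of the original cascade reduces to this.
--     k = (k or "").strip()
--     return _BY3.get(k[:3].lower(), k)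
-- ===== Notes on version B (the rewrite author's own statement) =====
-- stated objective: simpler
-- what changed: Every 3-letter key equals the title-cased first three letters of its month name, so A's four-branch cascade (exact match, long-name index lookup, dead reverse-dict lookup, fallback) collapses to a single strip + k[:3].title() + membership check; MONTHS_LONG and MONTHS_ALT are dropped.
import Mathlib
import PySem

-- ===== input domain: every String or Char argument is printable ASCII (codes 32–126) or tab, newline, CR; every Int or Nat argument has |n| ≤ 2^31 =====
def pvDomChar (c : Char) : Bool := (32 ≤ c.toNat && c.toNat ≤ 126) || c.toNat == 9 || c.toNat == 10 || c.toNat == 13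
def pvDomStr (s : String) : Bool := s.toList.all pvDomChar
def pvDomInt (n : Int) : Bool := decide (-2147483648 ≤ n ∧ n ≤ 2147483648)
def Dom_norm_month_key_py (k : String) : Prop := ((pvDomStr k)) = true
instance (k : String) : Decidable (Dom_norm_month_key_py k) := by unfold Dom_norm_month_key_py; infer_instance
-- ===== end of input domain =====

-- ===== PORT A =====
-- B replaces A's four-branch cascade by one case-insensitive dict lookup on the
-- first three characters (objective: simpler/idiomatic).

-- str.title() for ASCII (exact on Dom: a letter is uppercased after a
-- non-letter, lowercased after a letter; non-letters pass through unchanged).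
def pvTitleGo : Bool → List Char → List Char
  | _, [] => []
  | prev, c :: cs =>
      (if PySem.Chars.isalpha c then
        (if prev then PySem.Chars.lowerChar c else PySem.Chars.upperChar c)
       else c) :: pvTitleGo (PySem.Chars.isalpha c) cs

def pvTitle (s : String) : String := String.ofList (pvTitleGo false s.toList)

def pvMONTHS_3 : List String :=
  ["Jan","Feb","Mar","Apr","May","Jun","Jul","Aug","Sep","Oct","Nov","Dec"]

def pvMONTHS_LONG : List String :=
  ["January","February","March","April","May","June","July","August",
   "September","October","November","December"]

def pvMONTHS_ALT : List (String × String) := [("Jun","June"),("Jul","July"),("Sep","Sept")]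

def norm_month_key_py (k : String) : String :=
  let k := PySem.Str.strip k
  if k ∈ pvMONTHS_3 then k
  else if pvTitle k ∈ pvMONTHS_LONG then
    let idx := (PySem.List.index? pvMONTHS_LONG (pvTitle k)).getD 0
    pvMONTHS_3.getD idx ""
  else if k ∈ pvMONTHS_ALT.map Prod.fst then
    -- [kk for kk,v in MONTHS_ALT.items() if v == k][0]; the [0] IndexError is
    -- unreachable (the keys are all in MONTHS_3), ported as getD "".
    (((pvMONTHS_ALT.filter (fun p => p.2 == k)).map Prod.fst).getD 0 "")
  else
    let t := pvTitle (PySem.Str.slice k none (some 3))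
    if t ∈ pvMONTHS_3 then t else k

-- ===== PORT B =====
-- _BY3 = {m.lower(): m for m in MONTHS_3}
def pvBY3 : PySem.Dict String String :=
  pvMONTHS_3.foldl (fun d m => PySem.Dict.insert d (PySem.Str.lower m) m) PySem.Dict.empty

def norm_month_key_py_alt (k : String) : String :=
  let k := PySem.Str.strip k
  PySem.Dict.getD pvBY3 (PySem.Str.lower (PySem.Str.slice k none (some 3))) k

-- ===== PRECONDITION & SPEC =====
def Spec_norm_month_key_py (k : String) (out : String) : Prop := out = norm_month_key_py_alt k
instance (k : String) (out : String) : Decidable (Spec_norm_month_key_py k out) := by unfold Spec_norm_month_key_py; infer_instance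

-- ===== CLAIM (what is proved, stated in full; the proofs are below) =====
def Claim_equal_norm_month_key_py : Prop := ∀ (k : String), Dom_norm_month_key_py k → Spec_norm_month_key_py k (norm_month_key_py k)

-- ===== LEMMAS AND PROOFS =====

theorem pvChar_bounds_upper (c : Char) (h : PySem.Chars.isupper c = true) : 65 ≤ c.toNat ∧ c.toNat ≤ 90 := by
  simp [PySem.Chars.isupper, Char.le_def, UInt32.le_iff_toNat_le] at h
  exact h

theorem pvChar_bounds_lower (c : Char) (h : PySem.Chars.islower c = true) : 97 ≤ c.toNat ∧ c.toNat ≤ 122 := by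
  simp [PySem.Chars.islower, Char.le_def, UInt32.le_iff_toNat_le] at h
  exact h

theorem pvLowerChar_toNat (c : Char) :
    (PySem.Chars.lowerChar c).toNat = if 65 ≤ c.toNat ∧ c.toNat ≤ 90 then c.toNat + 32 else c.toNat := by
  unfold PySem.Chars.lowerChar
  by_cases h : PySem.Chars.isupper c = true
  · obtain ⟨h1, h2⟩ := pvChar_bounds_upper c h
    rw [if_pos h, if_pos ⟨h1, h2⟩, Char.toNat_ofNat, if_pos (Or.inl (by omega))]
  · rw [if_neg h, if_neg]
    intro hc
    apply h
    simp [PySem.Chars.isupper, Char.le_def, UInt32.le_iff_toNat_le]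
    exact hc

theorem pvUpperChar_toNat (c : Char) :
    (PySem.Chars.upperChar c).toNat = if 97 ≤ c.toNat ∧ c.toNat ≤ 122 then c.toNat - 32 else c.toNat := by
  unfold PySem.Chars.upperChar
  by_cases h : PySem.Chars.islower c = true
  · obtain ⟨h1, h2⟩ := pvChar_bounds_lower c h
    rw [if_pos h, if_pos ⟨h1, h2⟩, Char.toNat_ofNat, if_pos (Or.inl (by omega))]
  · rw [if_neg h, if_neg]
    intro hc
    apply h
    simp [PySem.Chars.islower, Char.le_def, UInt32.le_iff_toNat_le]
    exact hc

theorem pvChar_ext (a b : Char) (h : a.toNat = b.toNat) : a = b := by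
  first
  | exact Char.toNat_inj.mp h
  | · apply Char.ext
      exact UInt32.toNat_inj.mp h

theorem pvIsalpha_iff (c : Char) :
    PySem.Chars.isalpha c = true ↔ (65 ≤ c.toNat ∧ c.toNat ≤ 90) ∨ (97 ≤ c.toNat ∧ c.toNat ≤ 122) := by
  simp [PySem.Chars.isalpha, PySem.Chars.isupper, PySem.Chars.islower, Char.le_def,
        UInt32.le_iff_toNat_le]

theorem pvLowerChar_lowerChar (c : Char) :
    PySem.Chars.lowerChar (PySem.Chars.lowerChar c) = PySem.Chars.lowerChar c := by
  apply pvChar_ext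
  rw [pvLowerChar_toNat, pvLowerChar_toNat]
  split_ifs <;> omega

theorem pvLowerChar_upperChar (c : Char) :
    PySem.Chars.lowerChar (PySem.Chars.upperChar c) = PySem.Chars.lowerChar c := by
  apply pvChar_ext
  rw [pvLowerChar_toNat, pvUpperChar_toNat, pvLowerChar_toNat]
  split_ifs <;> omega

theorem pvUpperChar_lowerChar (c : Char) :
    PySem.Chars.upperChar (PySem.Chars.lowerChar c) = PySem.Chars.upperChar c := by
  apply pvChar_ext
  rw [pvUpperChar_toNat, pvLowerChar_toNat, pvUpperChar_toNat]
  split_ifs <;> omega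

theorem pvIsalpha_lowerChar (c : Char) :
    PySem.Chars.isalpha (PySem.Chars.lowerChar c) = PySem.Chars.isalpha c := by
  rw [Bool.eq_iff_iff, pvIsalpha_iff, pvIsalpha_iff, pvLowerChar_toNat]
  split_ifs <;> omega

-- lower ∘ title = lower: title only moves letters between the two cases
theorem pvLower_titleGo (b : Bool) (cs : List Char) :
    PySem.Chars.lower (pvTitleGo b cs) = PySem.Chars.lower cs := by
  induction cs generalizing b with
  | nil => rfl
  | cons c cs ih =>
    simp only [pvTitleGo, PySem.Chars.lower, List.map] at *
    refine congrArg₂ _ ?_ (ih _)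
    split_ifs with h1 h2
    · exact pvLowerChar_lowerChar c
    · exact pvLowerChar_upperChar c
    · rfl

theorem pvOfList_inj (cs ds : List Char) (h : String.ofList cs = String.ofList ds) : cs = ds := by
  simpa using congrArg String.toList h

theorem pvToList_title (s : String) : (pvTitle s).toList = pvTitleGo false s.toList := by
  simp [pvTitle]

-- the title of a 3-letter chunk is determined by its lowercase image
theorem pvTitle3 (x : List Char) (l0 l1 l2 : Char)
    (h : PySem.Chars.lower x = [l0, l1, l2])
    (hl0 : 97 ≤ l0.toNat ∧ l0.toNat ≤ 122)
    (hl1 : 97 ≤ l1.toNat ∧ l1.toNat ≤ 122)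
    (hl2 : 97 ≤ l2.toNat ∧ l2.toNat ≤ 122) :
    pvTitleGo false x = [PySem.Chars.upperChar l0, l1, l2] := by
  match x with
  | [a, b, c] =>
    simp only [PySem.Chars.lower, List.map, List.cons.injEq, and_true] at h
    obtain ⟨ha, hb, hc⟩ := h
    have hA : PySem.Chars.isalpha a = true := by
      rw [← pvIsalpha_lowerChar, ha, pvIsalpha_iff]; omega
    have hB : PySem.Chars.isalpha b = true := by
      rw [← pvIsalpha_lowerChar, hb, pvIsalpha_iff]; omega
    have hC : PySem.Chars.isalpha c = true := by
      rw [← pvIsalpha_lowerChar, hc, pvIsalpha_iff]; omega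
    simp only [pvTitleGo, hA, hB, hC, if_true]
    rw [← pvUpperChar_lowerChar a, ha, hb, hc]
    simp
  | [] => simp [PySem.Chars.lower] at h
  | [a] => simp [PySem.Chars.lower] at h
  | [a, b] => simp [PySem.Chars.lower] at h
  | a :: b :: c :: d :: t => simp [PySem.Chars.lower] at h

-- the key B looks up, on the list side
theorem pvBkey (s : String) :
    PySem.Str.lower (PySem.Str.slice s none (some 3))
      = String.ofList ((PySem.Chars.lower s.toList).take 3) := by
  unfold PySem.Str.lower
  rw [PySem.Str.toList_slice]
  simp only [PySem.Chars.slice]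
  rw [PySem.List.slice_to s.toList (by norm_num)]
  simp [PySem.Chars.lower, List.map_take]

theorem pvBvalue (s : String) (l3 : List Char) (v : String)
    (hl : (PySem.Chars.lower s.toList).take 3 = l3)
    (hv : PySem.Dict.get? pvBY3 (String.ofList l3) = some v) :
    PySem.Dict.getD pvBY3 (PySem.Str.lower (PySem.Str.slice s none (some 3))) s = v := by
  rw [PySem.Dict.getD, pvBkey s, hl, hv]
  rfl

def pvLOW3 : List String :=
  ["jan","feb","mar","apr","may","jun","jul","aug","sep","oct","nov","dec"]

theorem pvBY3_items :
    pvBY3.items = (pvLOW3.zip pvMONTHS_3) := by rfl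

theorem pvGet?_none (key : String) (h : key ∉ pvLOW3) :
    PySem.Dict.get? pvBY3 key = none := by
  unfold PySem.Dict.get?
  rw [pvBY3_items]
  rw [Option.map_eq_none_iff, List.find?_eq_none]
  intro p hp
  simp only [pvLOW3, pvMONTHS_3, List.zip, List.zipWith, List.mem_cons, List.not_mem_nil,
    or_false] at hp
  simp only [pvLOW3, List.mem_cons, List.not_mem_nil, or_false, not_or] at h
  rcases hp with h'|h'|h'|h'|h'|h'|h'|h'|h'|h'|h'|h' <;> subst h' <;>
    simp only [beq_iff_eq] <;> intro e <;> simp_all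

theorem pvTitle_slice3 (s : String) :
    pvTitle (PySem.Str.slice s none (some 3)) = String.ofList (pvTitleGo false (s.toList.take 3)) := by
  unfold pvTitle
  rw [PySem.Str.toList_slice]
  simp only [PySem.Chars.slice]
  rw [PySem.List.slice_to s.toList (by norm_num)]
  rfl

theorem pvLower_take3 (s : String) :
    PySem.Chars.lower (s.toList.take 3) = (PySem.Chars.lower s.toList).take 3 := by
  simp [PySem.Chars.lower, List.map_take]

-- the fallback branch: A's slice-and-title check equals B's dict lookup
theorem pv_fallback (s : String) :
    (if pvTitle (PySem.Str.slice s none (some 3)) ∈ pvMONTHS_3 then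
       pvTitle (PySem.Str.slice s none (some 3)) else s)
    = PySem.Dict.getD pvBY3 (PySem.Str.lower (PySem.Str.slice s none (some 3))) s := by
  by_cases hk : String.ofList ((PySem.Chars.lower s.toList).take 3) ∈ pvLOW3
  · simp only [pvLOW3, List.mem_cons, List.not_mem_nil, or_false] at hk
    rcases hk with hx|hx|hx|hx|hx|hx|hx|hx|hx|hx|hx|hx <;>
    · have hl := pvOfList_inj _ _ hx
      rw [pvBvalue s _ _ hl (by rfl)]
      have ht := pvTitle3 (s.toList.take 3) _ _ _
        (by rw [pvLower_take3, hl]) (by decide) (by decide) (by decide)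
      rw [pvTitle_slice3 s, ht, if_pos (by decide)]
      decide
  · have hnone : PySem.Dict.get? pvBY3 (PySem.Str.lower (PySem.Str.slice s none (some 3))) = none := by
      rw [pvBkey s]
      exact pvGet?_none _ hk
    rw [PySem.Dict.getD, hnone, Option.getD_none]
    rw [if_neg]
    intro ht
    apply hk
    simp only [pvMONTHS_3, List.mem_cons, List.not_mem_nil, or_false] at ht
    rcases ht with hx|hx|hx|hx|hx|hx|hx|hx|hx|hx|hx|hx <;>
    · rw [pvTitle_slice3 s] at hx
      have h3 := pvOfList_inj _ _ hx
      have hlow := congrArg PySem.Chars.lower h3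
      rw [pvLower_titleGo, pvLower_take3] at hlow
      rw [hlow]
      decide

-- core fact, stated on the stripped string
theorem pv_core (s : String) :
    (if s ∈ pvMONTHS_3 then s
     else if pvTitle s ∈ pvMONTHS_LONG then
       pvMONTHS_3.getD ((PySem.List.index? pvMONTHS_LONG (pvTitle s)).getD 0) ""
     else if s ∈ pvMONTHS_ALT.map Prod.fst then
       (((pvMONTHS_ALT.filter (fun p => p.2 == s)).map Prod.fst).getD 0 "")
     else
       let t := pvTitle (PySem.Str.slice s none (some 3))
       if t ∈ pvMONTHS_3 then t else s)
    = PySem.Dict.getD pvBY3 (PySem.Str.lower (PySem.Str.slice s none (some 3))) s := by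
  by_cases h1 : s ∈ pvMONTHS_3
  · -- s is one of the 12 abbreviations; both sides compute on each literal
    simp only [if_pos h1]
    fin_cases h1 <;> rfl
  · rw [if_neg h1]
    by_cases h2 : pvTitle s ∈ pvMONTHS_LONG
    · rw [if_pos h2]
      simp only [pvMONTHS_LONG, List.mem_cons, List.not_mem_nil, or_false] at h2
      rcases h2 with hx|hx|hx|hx|hx|hx|hx|hx|hx|hx|hx|hx <;>
      · rw [hx]
        have h' := congrArg String.toList hx
        rw [pvToList_title] at h'
        rw [pvBvalue s ((PySem.Chars.lower s.toList).take 3) _ rfl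
              (by rw [show (PySem.Chars.lower s.toList).take 3
                        = (PySem.Chars.lower (pvTitleGo false s.toList)).take 3 from by
                        rw [pvLower_titleGo], h']
                  rfl)]
        rfl
    · rw [if_neg h2]
      have h3 : s ∉ pvMONTHS_ALT.map Prod.fst := by
        intro hm
        apply h1
        simp only [pvMONTHS_ALT, List.map, List.mem_cons, List.not_mem_nil, or_false] at hm
        rcases hm with h|h|h <;> rw [h] <;> decide
      rw [if_neg h3]
      exact pv_fallback s

-- ===== VERDICT (by name: the statement is the Claim_ definition above) =====
theorem norm_month_key_py_spec : Claim_equal_norm_month_key_py := by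
  intro k _
  unfold Spec_norm_month_key_py norm_month_key_py norm_month_key_py_alt
  exact pv_core (PySem.Str.strip k)
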